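-- pv_equiv track=rewrite | github.com/Hanzy1996/OpenSeg-R | get_image_reason_feat.py | prepare_class_names_from_metadata_reason
-- ===== SOURCE A (Python) =====
-- def process_cot_text(classname, class_des, templates, num_des=3):
--     class_des = class_des['reason3']
--     des_sentence = [template.format(classname+' that has ' + i_des) for template in templates for i_des in class_des[:num_des]]
--     if len(class_des) < num_des:
--         raise ValueError(f"num_des should be less than the length of class_des, which is {len(class_des)}")
--     # des_sentence = [template.format(i_des+' of class ' + classname) for template in templates for i_des in class_des[:self.num_des]]
--     class_name_sentence = [template.format(classname) for template in templates ]
--     return des_sentence, num_des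
--
-- def prepare_class_names_from_metadata_reason(class_name_list, vis_reason, prompt_templates):
--     def split_labels(x):
--         res = []
--         for x_ in x:
--             x_ = x_.replace(', ', ',')
--             x_ = x_.split(',') # there can be multiple synonyms for single class
--             res.append(x_)
--         return res
--     # get text classifier
--
--     class_names = split_labels(class_name_list) # it includes both thing and stuff
--
--     all_class_names = class_names
--     validate_class_name = list(vis_reason.keys())
--
--
--     def matched_class_indices(class_a, validate_class):
--         matched_indices = None
--
--         for idx, entry in enumerate(validate_class):
--             parts = [item.strip() for item in entry.split(',')]
--             if any(cls in parts for cls in class_a):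
--                 return validate_class[idx]
--
--         return matched_indices
--
--     def fill_all_templates_ensemble(x_='', reasons=None):
--         res = []
--         for x in x_:
--             sentence, num_perclass_reason = process_cot_text(x, reasons, prompt_templates)
--             # import pdb; pdb.set_trace()
--             res = res + sentence
--         num_perclass_reason = num_perclass_reason
--         return res, (len(res) // len(prompt_templates))
--     num_templates = []
--     templated_class_names = []
--     validate_index = []
--     for i, x in enumerate(class_names):
--         # import pdb; pdb.set_trace()
--         matched_validate = matched_class_indices(x, validate_class_name)
--         # if not has_common_element(x, validate_class_name):
--         if not matched_validate is None:
--             # import pdb; pdb.set_trace()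
--             templated_classes, templated_classes_num = fill_all_templates_ensemble(x, vis_reason[matched_validate])
--             templated_class_names += templated_classes
--             num_templates.append(templated_classes_num) # how many templates for current classes
--             validate_index.append(i)
--         else:
--             continue
--     class_names = templated_class_names
--     return num_templates, class_names, validate_index
-- ===== SOURCE B (Python) =====
-- def prepare_class_names_from_metadata_reason(class_name_list, vis_reason, prompt_templates):
--     keys = list(vis_reason)
--     # one pass over the metadata: map each stripped part to the index of the
--     # earliest validate entry that contains it
--     part_index = {}
--     for idx, key in enumerate(keys):
--         for part in key.split(','):
--             part_index.setdefault(part.strip(), idx)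
--     num_templates = []
--     sentences = []
--     validate_index = []
--     for i, raw in enumerate(class_name_list):
--         names = raw.replace(', ', ',').split(',')
--         hits = [part_index[n] for n in names if n in part_index]
--         if not hits:
--             continue
--         des = vis_reason[keys[min(hits)]]['reason3'][:3]
--         for name in names:
--             for t in prompt_templates:
--                 for d in des:
--                     sentences.append(t.format(name + ' that has ' + d))
--         num_templates.append(len(names) * len(des))
--         validate_index.append(i)
--     return num_templates, sentences, validate_index
-- ===== Notes on version B (the rewrite author's own statement) =====
-- stated objective: faster
-- what changed: B builds one part->earliest-entry-index dictionary from the validate metadata and looks each class synonym up in it, instead of A's per-class rescan of every validate entry with re-split/strip of each entry, and computes each class's template count directly as len(names)*len(des) instead of A's len(res)//len(prompt_templates) recount.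
import Mathlib
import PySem

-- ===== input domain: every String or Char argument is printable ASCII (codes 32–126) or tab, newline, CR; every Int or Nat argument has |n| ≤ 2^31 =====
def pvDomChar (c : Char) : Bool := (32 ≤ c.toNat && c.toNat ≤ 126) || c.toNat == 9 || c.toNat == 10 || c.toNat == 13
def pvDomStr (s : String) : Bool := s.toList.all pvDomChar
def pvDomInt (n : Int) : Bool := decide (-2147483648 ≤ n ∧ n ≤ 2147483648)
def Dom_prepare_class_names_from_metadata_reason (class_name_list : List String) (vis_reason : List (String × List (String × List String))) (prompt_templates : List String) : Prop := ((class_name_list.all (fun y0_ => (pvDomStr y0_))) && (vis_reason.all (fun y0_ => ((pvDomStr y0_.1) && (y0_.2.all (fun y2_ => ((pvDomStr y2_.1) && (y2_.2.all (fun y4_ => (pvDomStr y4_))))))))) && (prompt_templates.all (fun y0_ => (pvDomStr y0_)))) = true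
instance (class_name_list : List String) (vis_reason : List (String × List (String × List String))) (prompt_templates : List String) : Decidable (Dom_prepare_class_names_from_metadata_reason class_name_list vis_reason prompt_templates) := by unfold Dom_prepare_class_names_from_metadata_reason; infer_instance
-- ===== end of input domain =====

-- B replaces A's per-class rescan of all validate entries (and its per-class sentence
-- recount) by one precomputed part→earliest-entry-index dictionary plus a direct count;
-- return value only, no observable mutation.

-- shared low-level string helpers (exact ports of the Python string operations both versions use)

-- x_.replace(', ', ',').split(',')
def pvNames (raw : String) : List String :=
  (PySem.Str.split? (PySem.Str.replace raw ", " ",") ",").getD []  -- sep "," ≠ "" so split? is always some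

-- [item.strip() for item in entry.split(',')]
def pvParts (entry : String) : List String :=
  ((PySem.Str.split? entry ",").getD []).map PySem.Str.strip  -- sep "," ≠ "" so split? is always some

-- hand port of template.format(arg) with ONE positional argument, exact on templates whose
-- replacement fields are only '{{', '}}', '{}' (at most once) or '{0}' (see pvTemplateOk /
-- Pre_); on other templates Python raises or uses the format mini-language and Pre_ excludes them.
def pvFmt : List Char → List Char → List Char
  | '{' :: '{' :: rest, a => '{' :: pvFmt rest a
  | '}' :: '}' :: rest, a => '}' :: pvFmt rest a
  | '{' :: '}' :: rest, a => a ++ pvFmt rest a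
  | '{' :: '0' :: '}' :: rest, a => a ++ pvFmt rest a
  | c :: rest, a => c :: pvFmt rest a
  | [], _ => []

def pvFormat1 (t : String) (arg : List Char) : String := String.ofList (pvFmt t.toList arg)

-- mode: 0 = no field seen, 1 = automatic '{}' already used, 2 = manual '{0}' numbering
def pvTOk : List Char → Nat → Bool
  | '{' :: '{' :: rest, m => pvTOk rest m
  | '}' :: '}' :: rest, m => pvTOk rest m
  | '{' :: '}' :: rest, m => if m = 0 then pvTOk rest 1 else false
  | '{' :: '0' :: '}' :: rest, m => if m = 1 then false else pvTOk rest 2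
  | '{' :: _, _ => false
  | '}' :: _, _ => false
  | _ :: rest, m => pvTOk rest m
  | [], _ => true

-- ===== PORT A =====

def pvSplitLabels (x : List String) : List (List String) :=
  x.foldl (fun res x_ => res ++ [pvNames x_]) []

def pvMatched (class_a : List String) : List String → Option String
  | [] => none
  | e :: rest =>
    if class_a.any (fun cls => (pvParts e).contains cls) then some e
    else pvMatched class_a rest

-- process_cot_text; the KeyError ('reason3' missing) and the len<3 ValueError are outside Pre_
def pvProcessCot (classname : String) (reasons : List (String × List String)) (templates : List String) : List String × Int :=
  let class_des := (reasons.lookup "reason3").getD []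
  let des_sentence := templates.flatMap (fun t =>
    (class_des.take 3).map (fun d => pvFormat1 t (classname.toList ++ (" that has ").toList ++ d.toList)))
  (des_sentence, 3)

-- fill_all_templates_ensemble; the ZeroDivisionError (templates = []) is outside Pre_
def pvFill (x_ : List String) (reasons : List (String × List String)) (templates : List String) : List String × Int :=
  let res := x_.foldl (fun res x => res ++ (pvProcessCot x reasons templates).1) []
  (res, PySem.Int.floordiv (res.length : Int) ((templates.length : Int)))

def prepare_class_names_from_metadata_reason (class_name_list : List String) (vis_reason : List (String × List (String × List String))) (prompt_templates : List String) : List Int × List String × List Int :=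
  let class_names := pvSplitLabels class_name_list
  let validate_class_name := PySem.List.dedup (vis_reason.map Prod.fst)
  (PySem.List.enumerate class_names 0).foldl
    (fun acc p =>
      match pvMatched p.2 validate_class_name with
      | some k =>
        let fl := pvFill p.2 ((vis_reason.lookup k).getD []) prompt_templates
        (acc.1 ++ [fl.2], acc.2.1 ++ fl.1, acc.2.2 ++ [p.1])
      | none => acc)
    ([], [], [])

-- ===== PORT B =====

def pvPartIndex (keys : List String) : PySem.Dict String Nat :=
  keys.zipIdx.foldl
    (fun d p => (pvParts p.1).foldl (fun d part => d.setdefault part p.2) d)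
    PySem.Dict.empty

def prepare_class_names_from_metadata_reason_alt (class_name_list : List String) (vis_reason : List (String × List (String × List String))) (prompt_templates : List String) : List Int × List String × List Int :=
  let keys := PySem.List.dedup (vis_reason.map Prod.fst)
  let part_index := pvPartIndex keys
  (PySem.List.enumerate class_name_list 0).foldl
    (fun acc p =>
      let names := pvNames p.2
      match names.filterMap (fun n => part_index.get? n) with
      | [] => acc
      | h :: t =>
        let key := keys.getD (t.foldl min h) ""
        let des := ((((vis_reason.lookup key).getD []).lookup "reason3").getD []).take 3
        let sents := names.flatMap (fun n => prompt_templates.flatMap (fun tl =>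
          des.map (fun d => pvFormat1 tl (n.toList ++ (" that has ").toList ++ d.toList))))
        (acc.1 ++ [((names.length * des.length : Nat) : Int)], acc.2.1 ++ sents, acc.2.2 ++ [p.1]))
    ([], [], [])

-- ===== PRECONDITION & SPEC =====
-- Pre_ excludes exactly: (a) inputs where A raises — a matched class whose validate entry has no
-- 'reason3' list or one shorter than 3 (KeyError/ValueError), an empty prompt_templates list with
-- some matched class (ZeroDivisionError), and templates whose '{'/'}' fields Python's format
-- rejects (lone braces, '{}' twice, mixed '{}'/'{0}', named/out-of-range fields); and
-- (b) two defensible corners: duplicate keys in the outer or an inner dict (Python's dict would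
-- keep the last value, the association list's first-match lookup the first), and templates whose
-- fields use the wider format mini-language ('{:>3}', '{0!r}', …), which is not ported.
def pvPreB (class_name_list : List String) (vis_reason : List (String × List (String × List String))) (prompt_templates : List String) : Bool :=
  decide ((vis_reason.map Prod.fst).Nodup) &&
  vis_reason.all (fun e => decide ((e.2.map Prod.fst).Nodup)) &&
  prompt_templates.all (fun t => pvTOk t.toList 0) &&
  class_name_list.all (fun raw =>
    match vis_reason.find? (fun e => (pvNames raw).any (fun c => (pvParts e.1).contains c)) with
    | none => true
    | some e =>
      !prompt_templates.isEmpty &&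
      (match e.2.lookup "reason3" with
       | some l => decide (3 ≤ l.length)
       | none => false))

def Pre_prepare_class_names_from_metadata_reason (class_name_list : List String) (vis_reason : List (String × List (String × List String))) (prompt_templates : List String) : Prop :=
  pvPreB class_name_list vis_reason prompt_templates = true
instance (class_name_list : List String) (vis_reason : List (String × List (String × List String))) (prompt_templates : List String) : Decidable (Pre_prepare_class_names_from_metadata_reason class_name_list vis_reason prompt_templates) := by unfold Pre_prepare_class_names_from_metadata_reason; infer_instance

def pvWitness_prepare_class_names_from_metadata_reason : List String × (List (String × List (String × List String))) × List String :=
  (["cat, dog", "fish"], [("cat,bird", [("reason3", ["a tail", "fur", "ears", "eyes"])])], ["a photo of a {}", "{}"])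

def Spec_prepare_class_names_from_metadata_reason (class_name_list : List String) (vis_reason : List (String × List (String × List String))) (prompt_templates : List String) (out : List Int × List String × List Int) : Prop := out = prepare_class_names_from_metadata_reason_alt class_name_list vis_reason prompt_templates
instance (class_name_list : List String) (vis_reason : List (String × List (String × List String))) (prompt_templates : List String) (out : List Int × List String × List Int) : Decidable (Spec_prepare_class_names_from_metadata_reason class_name_list vis_reason prompt_templates out) := by unfold Spec_prepare_class_names_from_metadata_reason; infer_instance

-- ===== CLAIM (what is proved, stated in full; the proofs are below) =====
def Claim_equal_prepare_class_names_from_metadata_reason : Prop := ∀ (class_name_list : List String) (vis_reason : List (String × List (String × List String))) (prompt_templates : List String), Dom_prepare_class_names_from_metadata_reason class_name_list vis_reason prompt_templates → Pre_prepare_class_names_from_metadata_reason class_name_list vis_reason prompt_templates → Spec_prepare_class_names_from_metadata_reason class_name_list vis_reason prompt_templates (prepare_class_names_from_metadata_reason class_name_list vis_reason prompt_templates)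

-- ===== LEMMAS AND PROOFS =====

-- first index (if any) of a validate entry whose parts contain n
def pvFIdx (n : String) : List String → Option Nat
  | [] => none
  | e :: r => if (pvParts e).contains n then some 0 else (pvFIdx n r).map (· + 1)

-- first index (if any) of a validate entry whose parts contain SOME name of the class
def pvFirstAny (names : List String) : List String → Option Nat
  | [] => none
  | e :: r =>
    if names.any (fun cls => (pvParts e).contains cls) then some 0
    else (pvFirstAny names r).map (· + 1)

-- min(hits) as B's match computes it
def pvMinOpt : List Nat → Option Nat
  | [] => none
  | h :: t => some (t.foldl min h)

lemma pvSetdefault_get? (parts : List String) (i : Nat) (d : PySem.Dict String Nat) (n : String) :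
    (parts.foldl (fun d part => d.setdefault part i) d).get? n
      = if parts.contains n ∧ d.get? n = none then some i else d.get? n := by
  induction parts generalizing d with
  | nil => simp
  | cons p ps ih =>
    simp only [List.foldl_cons, ih]
    by_cases hnp : n = p
    · subst hnp
      rw [PySem.Dict.get?_setdefault_self]
      cases hd : d.get? n <;> simp [hd]
    · rw [PySem.Dict.get?_setdefault_of_ne d i hnp]
      simp [hnp]

lemma pvPartIndex_get?_aux (keys : List String) (s : Nat) (d : PySem.Dict String Nat) (n : String) :
    ((keys.zipIdx s).foldl (fun d p => (pvParts p.1).foldl (fun d part => d.setdefault part p.2) d) d).get? n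
      = ((d.get? n).or ((pvFIdx n keys).map (· + s))) := by
  induction keys generalizing s d with
  | nil => simp [pvFIdx]
  | cons e r ih =>
    rw [List.zipIdx_cons, List.foldl_cons, ih, pvSetdefault_get?]
    by_cases hc : n ∈ pvParts e
    · cases hd : d.get? n <;> simp [pvFIdx, hc, hd]
    · cases hd : d.get? n <;> cases hf : pvFIdx n r <;>
        simp [pvFIdx, hc, hd, hf, Nat.add_assoc, Nat.add_comm 1 s]

lemma pvPartIndex_get? (keys : List String) (n : String) :
    (pvPartIndex keys).get? n = pvFIdx n keys := by
  have := pvPartIndex_get?_aux keys 0 PySem.Dict.empty n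
  simpa [pvPartIndex] using this

lemma pvFoldlMin_zero (t : List Nat) (h : Nat) (hz : 0 ∈ h :: t) : t.foldl min h = 0 := by
  induction t generalizing h with
  | nil =>
    simp only [List.mem_cons, List.not_mem_nil, or_false] at hz
    simp only [List.foldl_nil]
    omega
  | cons a t ih =>
    rw [List.foldl_cons]
    apply ih
    simp only [List.mem_cons] at hz ⊢
    rcases hz with h0 | h0 | h0
    · left; omega
    · left; omega
    · right; exact h0

lemma pvFoldlMin_map_succ (t : List Nat) (h : Nat) :
    (t.map (· + 1)).foldl min (h + 1) = t.foldl min h + 1 := by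
  induction t generalizing h with
  | nil => simp
  | cons a t ih =>
    rw [List.map_cons, List.foldl_cons, List.foldl_cons,
      show min (h + 1) (a + 1) = min h a + 1 by omega, ih]

lemma pvMinHits (names keys : List String) :
    pvMinOpt (names.filterMap (fun n => pvFIdx n keys)) = pvFirstAny names keys := by
  induction keys with
  | nil => simp [pvFIdx, pvFirstAny, pvMinOpt]
  | cons e r ih =>
    by_cases hc : names.any (fun cls => (pvParts e).contains cls) = true
    · rcases List.any_eq_true.mp hc with ⟨n, hn, hcn⟩
      have hmem : n ∈ pvParts e := by simpa using hcn
      have h0 : (0 : Nat) ∈ names.filterMap (fun n => pvFIdx n (e :: r)) := by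
        refine List.mem_filterMap.mpr ⟨n, hn, ?_⟩
        simp [pvFIdx, hmem]
      rw [pvFirstAny, if_pos hc]
      cases hh : names.filterMap (fun n => pvFIdx n (e :: r)) with
      | nil => rw [hh] at h0; simp at h0
      | cons h t =>
        rw [hh] at h0
        simp [pvMinOpt, pvFoldlMin_zero t h h0]
    · have hall : ∀ n ∈ names, n ∉ pvParts e := by
        intro n hn hmem
        exact hc (List.any_eq_true.mpr ⟨n, hn, by simpa using hmem⟩)
      have hfm : names.filterMap (fun n => pvFIdx n (e :: r))
          = (names.filterMap (fun n => pvFIdx n r)).map (· + 1) := by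
        rw [List.map_filterMap]
        apply List.filterMap_congr
        intro n hn
        simp [pvFIdx, hall n hn]
      rw [pvFirstAny, if_neg hc, hfm, ← ih]
      cases names.filterMap (fun n => pvFIdx n r) with
      | nil => simp [pvMinOpt]
      | cons h t => simp [pvMinOpt, pvFoldlMin_map_succ]

lemma pvMatched_eq_find? (names : List String) (keys : List String) :
    pvMatched names keys = keys.find? (fun e => names.any (fun cls => (pvParts e).contains cls)) := by
  induction keys with
  | nil => rfl
  | cons e r ih =>
    rw [pvMatched, List.find?_cons]
    cases hc : names.any (fun cls => (pvParts e).contains cls) <;> simp [hc, ih]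

lemma pvMatched_eq (names keys : List String) :
    pvMatched names keys = (pvFirstAny names keys).map (fun j => keys.getD j "") := by
  induction keys with
  | nil => rfl
  | cons e r ih =>
    rw [pvMatched, pvFirstAny]
    cases hc : names.any (fun cls => (pvParts e).contains cls)
    · simp only [Bool.false_eq_true, if_false, ih, Option.map_map]
      cases pvFirstAny names r <;> simp
    · simp [hc]

lemma pvMatched_dedup_isSome (names : List String) (vis : List (String × List (String × List String))) :
    (pvMatched names (PySem.List.dedup (vis.map Prod.fst))).isSome
      = (vis.find? (fun e => names.any (fun cls => (pvParts e.1).contains cls))).isSome := by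
  rw [pvMatched_eq_find?, Bool.eq_iff_iff]
  simp only [List.find?_isSome]
  constructor <;> intro h
  · rcases h with ⟨x, hx, hp⟩
    have hx' : x ∈ vis.map Prod.fst := by simpa [PySem.List.mem_dedup] using hx
    rcases List.mem_map.mp hx' with ⟨e, he, rfl⟩
    exact ⟨e, he, hp⟩
  · rcases h with ⟨e, he, hp⟩
    refine ⟨e.1, ?_, hp⟩
    have : e.1 ∈ vis.map Prod.fst := List.mem_map.mpr ⟨e, he, rfl⟩
    simpa [PySem.List.mem_dedup] using this

lemma pvSplitLabels_eq_map (x : List String) : pvSplitLabels x = x.map pvNames := by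
  rw [pvSplitLabels]
  rw [PySem.List.foldl_append_singleton_eq_map]
  simp

lemma pvFoldEnum {α β σ : Type} (f : σ → Int × β → σ) (g : σ → Int × α → σ) (h : α → β) (cl : List α)
    (hstep : ∀ acc i x, x ∈ cl → f acc (i, h x) = g acc (i, x)) :
    ∀ (s : Int) (acc : σ),
      (PySem.List.enumerate (cl.map h) s).foldl f acc = (PySem.List.enumerate cl s).foldl g acc := by
  induction cl with
  | nil => intro s acc; rfl
  | cons x cl ih =>
    intro s acc
    rw [List.map_cons, PySem.List.enumerate_cons, PySem.List.enumerate_cons,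
      List.foldl_cons, List.foldl_cons, hstep acc s x List.mem_cons_self]
    exact ih (fun acc i y hy => hstep acc i y (List.mem_cons_of_mem x hy)) (s + 1) (g acc (s, x))

lemma pvFill_fst (names : List String) (reasons : List (String × List String)) (tpl : List String) :
    (pvFill names reasons tpl).1
      = names.flatMap (fun n => tpl.flatMap (fun tl =>
          (((reasons.lookup "reason3").getD []).take 3).map
            (fun d => pvFormat1 tl (n.toList ++ (" that has ").toList ++ d.toList)))) := by
  rw [pvFill]
  dsimp only
  rw [PySem.List.foldl_append_eq_flatMap]
  rfl

-- length of the sentence block one matched class contributes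
lemma pvFill_res_length (names : List String) (reasons : List (String × List String)) (tpl : List String) :
    (names.flatMap (fun x => (pvProcessCot x reasons tpl).1)).length
      = names.length * (tpl.length * (((reasons.lookup "reason3").getD []).take 3).length) := by
  rw [List.length_flatMap]
  have hinner : ∀ n : String, ((pvProcessCot n reasons tpl).1).length
      = tpl.length * (((reasons.lookup "reason3").getD []).take 3).length := by
    intro n
    dsimp only [pvProcessCot]
    rw [List.length_flatMap]
    simp [List.map_const']
  simp only [hinner]
  simp [List.map_const']

lemma pvFill_snd (names : List String) (reasons : List (String × List String)) (tpl : List String)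
    (htpl : tpl ≠ []) :
    (pvFill names reasons tpl).2
      = ((names.length * (((reasons.lookup "reason3").getD []).take 3).length : Nat) : Int) := by
  have hT : 0 < tpl.length := List.length_pos_iff.mpr htpl
  rw [pvFill]
  dsimp only
  rw [PySem.List.foldl_append_eq_flatMap, List.nil_append, pvFill_res_length,
    PySem.Int.floordiv_natCast]
  congr 1
  rw [show names.length * (tpl.length * (((reasons.lookup "reason3").getD []).take 3).length)
        = (names.length * (((reasons.lookup "reason3").getD []).take 3).length) * tpl.length by ring,
    Nat.mul_div_cancel _ hT]

lemma pvStep (vis : List (String × List (String × List String))) (tpl : List String)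
    (raw : String) (i : Int) (acc : List Int × List String × List Int)
    (htpl : (vis.find? (fun e => (pvNames raw).any (fun cls => (pvParts e.1).contains cls))).isSome → tpl ≠ []) :
    (fun (acc : List Int × List String × List Int) (p : Int × List String) =>
      match pvMatched p.2 (PySem.List.dedup (vis.map Prod.fst)) with
      | some k =>
        let fl := pvFill p.2 ((vis.lookup k).getD []) tpl
        (acc.1 ++ [fl.2], acc.2.1 ++ fl.1, acc.2.2 ++ [p.1])
      | none => acc) acc (i, pvNames raw)
    = (fun (acc : List Int × List String × List Int) (p : Int × String) =>
      let names := pvNames p.2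
      match names.filterMap (fun n => (pvPartIndex (PySem.List.dedup (vis.map Prod.fst))).get? n) with
      | [] => acc
      | h :: t =>
        let key := (PySem.List.dedup (vis.map Prod.fst)).getD (t.foldl min h) ""
        let des := ((((vis.lookup key).getD []).lookup "reason3").getD []).take 3
        let sents := names.flatMap (fun n => tpl.flatMap (fun tl =>
          des.map (fun d => pvFormat1 tl (n.toList ++ (" that has ").toList ++ d.toList))))
        (acc.1 ++ [((names.length * des.length : Nat) : Int)], acc.2.1 ++ sents, acc.2.2 ++ [p.1])) acc (i, raw) := by
  dsimp only
  simp only [pvPartIndex_get?]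
  have hmin := pvMinHits (pvNames raw) (PySem.List.dedup (vis.map Prod.fst))
  rw [pvMatched_eq]
  cases hm : pvFirstAny (pvNames raw) (PySem.List.dedup (vis.map Prod.fst)) with
  | none =>
    rw [hm] at hmin
    cases hh : (pvNames raw).filterMap (fun n => pvFIdx n (PySem.List.dedup (vis.map Prod.fst))) with
    | nil => rfl
    | cons h t => rw [hh, pvMinOpt] at hmin; cases hmin
  | some m =>
    rw [hm] at hmin
    have hsome : (vis.find? (fun e => (pvNames raw).any (fun cls => (pvParts e.1).contains cls))).isSome := by
      rw [← pvMatched_dedup_isSome, pvMatched_eq, hm]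
      rfl
    have htplne : tpl ≠ [] := htpl hsome
    cases hh : (pvNames raw).filterMap (fun n => pvFIdx n (PySem.List.dedup (vis.map Prod.fst))) with
    | nil => rw [hh, pvMinOpt] at hmin; cases hmin
    | cons h t =>
      rw [hh, pvMinOpt] at hmin
      have hfold : t.foldl min h = m := by injection hmin
      dsimp only [Option.map_some]
      rw [hfold, pvFill_fst, pvFill_snd _ _ _ htplne]

theorem prepare_class_names_from_metadata_reason_spec : Claim_equal_prepare_class_names_from_metadata_reason := by
  intro cl vis tpl _hdom hpre
  unfold Spec_prepare_class_names_from_metadata_reason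
  simp only [prepare_class_names_from_metadata_reason, prepare_class_names_from_metadata_reason_alt]
  rw [pvSplitLabels_eq_map]
  refine pvFoldEnum _ _ pvNames cl ?_ 0 ([], [], [])
  intro acc i raw hraw
  apply pvStep
  intro hsome
  unfold Pre_prepare_class_names_from_metadata_reason pvPreB at hpre
  simp only [Bool.and_eq_true, List.all_eq_true] at hpre
  have hcl := hpre.2 raw hraw
  cases hf : vis.find? (fun e => (pvNames raw).any (fun cls => (pvParts e.1).contains cls)) with
  | none => rw [hf] at hsome; simp at hsome
  | some e =>
    rw [hf] at hcl
    simp only [Bool.and_eq_true] at hcl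
    intro hnil
    rw [hnil] at hcl
    simp at hcl
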